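-- pv_equiv track=rewrite | github.com/teenu/noobai-xl-modular | utils/schedules.py | generate_smart_schedule
-- ===== SOURCE A (Python) =====
-- from typing import Optional, Tuple, List
--
-- def generate_smart_schedule(num_steps: int) -> List[int]:
--     """Generate smart toggle schedule: ON,OFF through step 20, then ON for remainder."""
--     if num_steps <= 0:
--         return []
--     schedule = []
--     for i in range(num_steps):
--         if i <= 19:
--             schedule.append(1 if i % 2 == 0 else 0)
--         else:
--             schedule.append(1)
--     return schedule
-- ===== SOURCE B (Python) =====
-- from typing import List
--
-- _PREFIX = [1 if i % 2 == 0 else 0 for i in range(20)]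
--
-- def generate_smart_schedule(num_steps: int) -> List[int]:
--     if num_steps <= 0:
--         return []
--     if num_steps <= 20:
--         return _PREFIX[:num_steps]
--     return _PREFIX + [1] * (num_steps - 20)
-- ===== Notes on version B (the rewrite author's own statement) =====
-- stated objective: simpler
-- what changed: Replaces A's per-element branch-in-loop with a precomputed fixed alternating prefix, returned as a slice for short schedules or concatenated with a constant-one fill for long ones.
import Mathlib
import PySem

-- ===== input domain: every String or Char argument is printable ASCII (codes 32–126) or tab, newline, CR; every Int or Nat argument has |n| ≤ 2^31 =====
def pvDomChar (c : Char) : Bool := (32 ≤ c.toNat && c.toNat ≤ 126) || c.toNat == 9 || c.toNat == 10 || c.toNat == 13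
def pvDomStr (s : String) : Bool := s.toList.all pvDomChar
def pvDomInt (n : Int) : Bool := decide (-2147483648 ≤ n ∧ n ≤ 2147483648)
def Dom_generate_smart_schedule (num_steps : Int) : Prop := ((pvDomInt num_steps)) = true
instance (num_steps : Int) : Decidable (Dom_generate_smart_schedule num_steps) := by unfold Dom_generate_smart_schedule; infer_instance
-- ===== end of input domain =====

-- B replaces A's per-element branch-in-loop with a precomputed 20-step alternating
-- prefix, sliced for short schedules or extended with a constant [1]-fill (simpler).

-- ===== PORT A =====
def generate_smart_schedule (num_steps : Int) : List Int :=
  if num_steps ≤ 0 then []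
  else
    (PySem.List.pyRange 0 num_steps 1).foldl
      (fun schedule i =>
        schedule ++ [if i ≤ 19 then (if PySem.Int.mod i 2 = 0 then (1 : Int) else 0) else 1])
      []

-- ===== PORT B =====
-- _PREFIX = [1 if i % 2 == 0 else 0 for i in range(20)]
def pvPrefix : List Int :=
  (PySem.List.pyRange 0 20 1).map (fun i => if PySem.Int.mod i 2 = 0 then (1 : Int) else 0)

def generate_smart_schedule_alt (num_steps : Int) : List Int :=
  if num_steps ≤ 0 then []
  else if num_steps ≤ 20 then PySem.List.slice pvPrefix none (some num_steps)
  else pvPrefix ++ List.replicate (num_steps - 20).toNat 1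

-- ===== PRECONDITION & SPEC =====
def Spec_generate_smart_schedule (num_steps : Int) (out : List Int) : Prop := out = generate_smart_schedule_alt num_steps
instance (num_steps : Int) (out : List Int) : Decidable (Spec_generate_smart_schedule num_steps out) := by unfold Spec_generate_smart_schedule; infer_instance

-- ===== CLAIM (what is proved, stated in full; the proofs are below) =====
def Claim_equal_generate_smart_schedule : Prop := ∀ (num_steps : Int), Dom_generate_smart_schedule num_steps → Spec_generate_smart_schedule num_steps (generate_smart_schedule num_steps)

-- ===== LEMMAS AND PROOFS =====

-- the per-step value A appends
def pvStep (i : Int) : Int :=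
  if i ≤ 19 then (if PySem.Int.mod i 2 = 0 then (1 : Int) else 0) else 1

-- A's step, as a function of the Nat loop index
def pvStepN (k : Nat) : Int := pvStep (Int.ofNat k)

theorem pvPrefix_eq : pvPrefix = (List.range 20).map pvStepN := by decide

theorem pvMap_range_ge (j : Nat) :
    (List.range (20 + j)).map pvStepN =
      (List.range 20).map pvStepN ++ List.replicate j 1 := by
  induction j with
  | zero => simp
  | succ j ih =>
    have h : 20 + (j + 1) = (20 + j) + 1 := by omega
    rw [h, List.range_succ, List.map_append, ih, List.map_singleton]
    have hstep : pvStepN (20 + j) = 1 := by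
      unfold pvStepN pvStep
      simp [Int.ofNat_eq_natCast]
      omega
    rw [hstep, List.append_assoc]
    congr 1
    rw [List.replicate_succ' (n := j)]

theorem generate_smart_schedule_spec : Claim_equal_generate_smart_schedule := by
  intro n _
  unfold Spec_generate_smart_schedule generate_smart_schedule generate_smart_schedule_alt
  by_cases h0 : n ≤ 0
  · simp [h0]
  · simp only [h0, if_false]
    have hA : (PySem.List.pyRange 0 n 1).foldl
        (fun schedule i =>
          schedule ++ [if i ≤ 19 then (if PySem.Int.mod i 2 = 0 then (1 : Int) else 0) else 1]) []
        = (List.range n.toNat).map pvStepN := by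
      rw [PySem.List.foldl_append_singleton_eq_map, List.nil_append,
        PySem.List.pyRange_one, List.map_map]
      simp [Function.comp_def, pvStepN, pvStep, Int.ofNat_eq_natCast]
    rw [hA]
    by_cases h20 : n ≤ 20
    · simp only [h20, if_true]
      rw [PySem.List.slice_to _ (by omega), pvPrefix_eq, ← List.map_take, List.take_range]
      have : min n.toNat 20 = n.toNat := by omega
      rw [this]
    · simp only [h20, if_false]
      have hm : n.toNat = 20 + (n - 20).toNat := by omega
      rw [hm, pvMap_range_ge, pvPrefix_eq]
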